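-- pv_equiv track=rewrite | github.com/anthonyngu2/Advent-Of-Code | Day 8 - Space Image Format/Part 1.py | layer_counter
-- ===== SOURCE A (Python) =====
-- def layer_counter(number_of_layer, layer):
--     zero_count = 0
--     one_count = 0
--     two_count = 0
--     log = {}
--
--     for digit_position, digit in enumerate(layer):
--         if digit == '0':
--             zero_count += 1
--         if digit == '1':
--             one_count += 1
--         if digit == '2':
--             two_count += 1
--         if digit_position == len(layer) - 1:
--             number_of_layer = number_of_layer + 1
--             log['layer %s' % number_of_layer] =  number_of_layer
--             log['zero count'] = zero_count
--             log['one count'] = one_count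
--             log['two count'] = two_count
--
--     return log
-- ===== SOURCE B (Python) =====
-- def layer_counter(number_of_layer, layer):
--     log = {}
--     if layer:
--         number_of_layer += 1
--         log['layer %s' % number_of_layer] = number_of_layer
--         log['zero count'] = layer.count('0')
--         log['one count'] = layer.count('1')
--         log['two count'] = layer.count('2')
--     return log
-- ===== Notes on version B (the rewrite author's own statement) =====
-- stated objective: simpler
-- what changed: replaces the single enumerate loop with three running accumulators and a last-index test by an emptiness guard plus three direct str.count scans (C-level scans instead of a Python-level char loop)
import Mathlib
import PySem

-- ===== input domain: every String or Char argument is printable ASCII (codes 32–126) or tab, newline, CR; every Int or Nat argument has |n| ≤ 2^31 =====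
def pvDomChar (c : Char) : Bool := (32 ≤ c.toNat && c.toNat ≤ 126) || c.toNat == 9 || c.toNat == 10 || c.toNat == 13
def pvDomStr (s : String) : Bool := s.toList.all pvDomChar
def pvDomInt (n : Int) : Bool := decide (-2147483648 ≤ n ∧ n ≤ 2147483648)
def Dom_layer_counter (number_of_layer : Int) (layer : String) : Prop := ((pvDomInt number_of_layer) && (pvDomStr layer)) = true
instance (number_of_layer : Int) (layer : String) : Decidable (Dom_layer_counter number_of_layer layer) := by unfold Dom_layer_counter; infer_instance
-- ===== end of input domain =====

-- B replaces A's single enumerate loop (three accumulators + last-index test) by an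
-- emptiness guard plus three direct str.count scans: simpler decomposition, same cost.


-- ===== PORT A =====
-- one fold over enumerate(layer): three digit counters, and on the last index the
-- dict is filled; state = (zero_count, one_count, two_count, number_of_layer, log)
def layer_counter (number_of_layer : Int) (layer : String) : List (String × Int) :=
  (((PySem.List.enumerate layer.toList 0).foldl
      (fun (st : Int × Int × Int × Int × PySem.Dict String Int) p =>
        let z := if p.2 == '0' then st.1 + 1 else st.1
        let o := if p.2 == '1' then st.2.1 + 1 else st.2.1
        let t := if p.2 == '2' then st.2.2.1 + 1 else st.2.2.1
        if p.1 = (layer.toList.length : Int) - 1 then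
          let nl := st.2.2.2.1 + 1
          let log := ((((st.2.2.2.2.insert ("layer " ++ PySem.Int.toStr nl) nl).insert
            "zero count" z).insert "one count" o).insert "two count" t)
          (z, o, t, nl, log)
        else
          (z, o, t, st.2.2.2.1, st.2.2.2.2))
      (0, 0, 0, number_of_layer, (PySem.Dict.empty : PySem.Dict String Int)))).2.2.2.2.items

-- ===== PORT B =====
-- emptiness guard, then three str.count scans
def layer_counter_alt (number_of_layer : Int) (layer : String) : List (String × Int) :=
  if layer.toList = [] then (PySem.Dict.empty : PySem.Dict String Int).items
  else
    let nl := number_of_layer + 1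
    ((((((PySem.Dict.empty : PySem.Dict String Int).insert ("layer " ++ PySem.Int.toStr nl) nl).insert
      "zero count" (PySem.Str.count layer "0" : Int)).insert
      "one count" (PySem.Str.count layer "1" : Int)).insert
      "two count" (PySem.Str.count layer "2" : Int))).items

-- ===== PRECONDITION & SPEC =====
def Spec_layer_counter (number_of_layer : Int) (layer : String) (out : List (String × Int)) : Prop := out = layer_counter_alt number_of_layer layer
instance (number_of_layer : Int) (layer : String) (out : List (String × Int)) : Decidable (Spec_layer_counter number_of_layer layer out) := by unfold Spec_layer_counter; infer_instance

-- ===== CLAIM (what is proved, stated in full; the proofs are below) =====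
def Claim_equal_layer_counter : Prop := ∀ (number_of_layer : Int) (layer : String), Dom_layer_counter number_of_layer layer → Spec_layer_counter number_of_layer layer (layer_counter number_of_layer layer)

-- ===== LEMMAS AND PROOFS =====

-- Python s.count(c) for a single character c equals the list count of c
theorem count_go_singleton (c : Char) : ∀ (fuel : Nat) (s : List Char) (acc : Nat),
    s.length ≤ fuel → PySem.Chars.count.go [c] fuel s acc = acc + s.count c := by
  intro fuel
  induction fuel with
  | zero =>
    intro s acc h
    have : s = [] := List.eq_nil_of_length_eq_zero (Nat.le_zero.mp h)
    subst this
    simp [PySem.Chars.count.go]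
  | succ n ih =>
    intro s acc h
    cases s with
    | nil => simp [PySem.Chars.count.go]
    | cons hd tl =>
      simp only [PySem.Chars.count.go]
      have htl : tl.length ≤ n := by simp at h; omega
      by_cases hc : c = hd
      · subst hc
        have hpre : [c].isPrefixOf (c :: tl) = true := by simp [List.isPrefixOf]
        simp only [hpre, if_pos]
        have hdrop : List.drop [c].length (c :: tl) = tl := by simp
        rw [hdrop, ih tl (acc + 1) htl]
        simp [List.count_cons]
        omega
      · have hpre : [c].isPrefixOf (hd :: tl) = false := by
          simp [List.isPrefixOf, hc]
        simp only [hpre]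
        rw [if_neg (by simp [hc])]
        rw [ih tl acc htl]
        simp [List.count_cons, hc]
        intro h'; exact absurd h'.symm hc

theorem str_count_single (s : String) (c : Char) :
    PySem.Str.count s (String.ofList [c]) = s.toList.count c := by
  rw [PySem.Str.count_eq]
  have hl : (String.ofList [c]).toList = [c] := by simp
  rw [hl]
  unfold PySem.Chars.count
  rw [if_neg (by simp)]
  rw [count_go_singleton c s.toList.length s.toList 0 (le_refl _)]
  omega

-- the branch-free counting fold: accumulates the three counts, leaves nl and log alone
theorem foldl_counts (l : List (Int × Char)) (z o t nl : Int) (log : PySem.Dict String Int) :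
    l.foldl
      (fun (st : Int × Int × Int × Int × PySem.Dict String Int) p =>
        ((if p.2 == '0' then st.1 + 1 else st.1),
         (if p.2 == '1' then st.2.1 + 1 else st.2.1),
         (if p.2 == '2' then st.2.2.1 + 1 else st.2.2.1),
         st.2.2.2.1, st.2.2.2.2))
      (z, o, t, nl, log)
    = (z + ((l.map (·.2)).count '0' : Nat), o + ((l.map (·.2)).count '1' : Nat),
       t + ((l.map (·.2)).count '2' : Nat), nl, log) := by
  induction l generalizing z o t with
  | nil => simp
  | cons p tl ih =>
    simp only [List.foldl_cons, List.map_cons, List.count_cons, ih]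
    congr 1 <;> [skip; congr 1] <;> [skip; skip; congr 1]
    all_goals
      split_ifs with h <;> simp_all <;> push_cast <;> omega

-- ===== VERDICT (by name: the statement is the Claim_ definition above) =====
theorem layer_counter_spec : Claim_equal_layer_counter := by
  intro n layer _
  unfold Spec_layer_counter layer_counter layer_counter_alt
  by_cases hnil : layer.toList = []
  · simp [hnil]
  · rw [if_neg hnil]
    obtain h | ⟨init, last, hsplit⟩ := List.eq_nil_or_concat (l := layer.toList)
    · exact absurd h hnil
    rw [List.concat_eq_append] at hsplit
    rw [hsplit, PySem.List.enumerate_append]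
    simp only [List.foldl_append]
    -- the fold over the initial segment never reaches the last-index branch
    have hlen : ((init ++ [last]).length : Int) - 1 = (init.length : Int) := by
      simp
    have hstep :
        (PySem.List.enumerate init 0).foldl
          (fun (st : Int × Int × Int × Int × PySem.Dict String Int) p =>
            let z := if p.2 == '0' then st.1 + 1 else st.1
            let o := if p.2 == '1' then st.2.1 + 1 else st.2.1
            let t := if p.2 == '2' then st.2.2.1 + 1 else st.2.2.1
            if p.1 = ((init ++ [last]).length : Int) - 1 then
              let nl := st.2.2.2.1 + 1
              let log := ((((st.2.2.2.2.insert ("layer " ++ PySem.Int.toStr nl) nl).insert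
                "zero count" z).insert "one count" o).insert "two count" t)
              (z, o, t, nl, log)
            else
              (z, o, t, st.2.2.2.1, st.2.2.2.2))
          (0, 0, 0, n, (PySem.Dict.empty : PySem.Dict String Int))
        = (((init.count '0' : Nat) : Int), ((init.count '1' : Nat) : Int),
           ((init.count '2' : Nat) : Int), n, (PySem.Dict.empty : PySem.Dict String Int)) := by
      rw [PySem.List.foldl_congr_mem _ _
        (fun (st : Int × Int × Int × Int × PySem.Dict String Int) p =>
          ((if p.2 == '0' then st.1 + 1 else st.1),
           (if p.2 == '1' then st.2.1 + 1 else st.2.1),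
           (if p.2 == '2' then st.2.2.1 + 1 else st.2.2.1),
           st.2.2.2.1, st.2.2.2.2)) _ ?_]
      · rw [foldl_counts]
        simp [PySem.List.map_snd_enumerate]
      · intro acc x hx
        rw [PySem.List.mem_enumerate_iff] at hx
        obtain ⟨k, hk, rfl⟩ := hx
        have : ¬ ((0 : Int) + (k : Int) = ((init ++ [last]).length : Int) - 1) := by
          rw [hlen]; omega
        simp
        intro hke
        exact absurd hke (by omega)
    rw [hstep]
    -- the single last step fires the branch
    have hlast : PySem.List.enumerate [last] (0 + (init.length : Int)) =
        [((init.length : Int), last)] := by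
      simp [PySem.List.enumerate]
    rw [hlast]
    simp only [List.foldl_cons, List.foldl_nil]
    rw [if_pos (by rw [hlen])]
    -- the three final counts are the counts of the whole string
    have hcnt : ∀ c : Char,
        (if last == c then ((init.count c : Nat) : Int) + 1 else ((init.count c : Nat) : Int))
        = ((PySem.Str.count layer (String.ofList [c]) : Nat) : Int) := by
      intro c
      rw [str_count_single, hsplit]
      simp [List.count_append, List.count_cons]
      split_ifs with h <;> simp_all
    have h0 := hcnt '0'
    have h1 := hcnt '1'
    have h2 := hcnt '2'
    simp only [beq_iff_eq] at h0 h1 h2 ⊢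
    simp only [show ("0" : String) = String.ofList ['0'] from rfl,
      show ("1" : String) = String.ofList ['1'] from rfl,
      show ("2" : String) = String.ofList ['2'] from rfl]
    rw [← h0, ← h1, ← h2]
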